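-- pv_equiv track=rewrite | github.com/TaeyanG4/Baekjoon | 백준/Bronze/1284. 집 주소/집 주소.py | solution
-- ===== SOURCE A (Python) =====
-- def solution(n):
--     s = str(n)
--     ans = len(s)+1
--     for c in s:
--         if c == '0':
--             ans += 4
--         elif c == '1':
--             ans += 2
--         else:
--             ans += 3
--     return ans
-- ===== SOURCE B (Python) =====
-- def solution(n):
--     s = str(n)
--     return 4 * len(s) + 1 + s.count('0') - s.count('1')
-- ===== Notes on version B (the rewrite author's own statement) =====
-- stated objective: simpler
-- what changed: Replaced the per-character branching loop with a branchless closed-form arithmetic expression: 4*len(s)+1+s.count('0')-s.count('1'), since every character costs 3 except '0' (+1) and '1' (-1).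
import Mathlib
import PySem

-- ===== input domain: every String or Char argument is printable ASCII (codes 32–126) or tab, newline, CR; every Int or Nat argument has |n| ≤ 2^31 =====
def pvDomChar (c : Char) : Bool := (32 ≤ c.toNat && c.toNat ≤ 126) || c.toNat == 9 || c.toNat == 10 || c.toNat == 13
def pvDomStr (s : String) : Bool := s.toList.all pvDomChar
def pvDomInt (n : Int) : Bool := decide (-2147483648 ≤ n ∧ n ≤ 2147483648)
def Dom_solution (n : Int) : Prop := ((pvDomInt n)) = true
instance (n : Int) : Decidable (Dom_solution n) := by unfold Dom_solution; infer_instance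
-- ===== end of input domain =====

-- B replaces A's per-digit branching loop by the closed form 4*len(s)+1+s.count('0')-s.count('1') (simpler).
-- ===== PORT A =====
def solution (n : Int) : Int :=
  let s := PySem.Int.toStr n
  let ans : Int := PySem.Str.len s + 1
  s.toList.foldl (fun ans c =>
    if c == '0' then ans + 4
    else if c == '1' then ans + 2
    else ans + 3) ans

-- ===== PORT B =====
def solution_alt (n : Int) : Int :=
  let s := PySem.Int.toStr n
  4 * PySem.Str.len s + 1 + (PySem.Str.count s "0" : Int) - (PySem.Str.count s "1" : Int)

-- ===== PRECONDITION & SPEC =====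
def Spec_solution (n : Int) (out : Int) : Prop := out = solution_alt n
instance (n : Int) (out : Int) : Decidable (Spec_solution n out) := by unfold Spec_solution; infer_instance

-- ===== CLAIM (what is proved, stated in full; the proofs are below) =====
def Claim_equal_solution : Prop := ∀ (n : Int), Dom_solution n → Spec_solution n (solution n)

-- ===== LEMMAS AND PROOFS =====

-- Chars.count.go with a single-character pattern counts occurrences of that character.
theorem count_go_singleton (c : Char) (cs : List Char) (fuel acc : Nat)
    (h : cs.length ≤ fuel) :
    PySem.Chars.count.go [c] fuel cs acc = acc + cs.count c := by
  induction cs generalizing fuel acc with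
  | nil => cases fuel <;> simp [PySem.Chars.count.go]
  | cons x t ih =>
    cases fuel with
    | zero => simp at h
    | succ f =>
      simp only [List.length_cons, Nat.succ_le_succ_iff] at h
      simp only [PySem.Chars.count.go, List.isPrefixOf, List.count_cons]
      by_cases hx : c = x
      · subst hx
        simp [ih _ _ h]
        omega
      · have : (c == x) = false := by simp [hx]
        simp [this, ih _ _ h, Ne.symm hx]

-- Python s.count(c) for a single character c equals List.count.
theorem chars_count_singleton (c : Char) (cs : List Char) :
    PySem.Chars.count cs [c] = cs.count c := by
  simp [PySem.Chars.count, count_go_singleton c cs cs.length 0 le_rfl]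

-- A's accumulating loop in closed form.
theorem foldl_cost (cs : List Char) (a : Int) :
    cs.foldl (fun ans c =>
      if c == '0' then ans + 4
      else if c == '1' then ans + 2
      else ans + 3) a
    = a + 3 * cs.length + cs.count '0' - cs.count '1' := by
  induction cs generalizing a with
  | nil => simp
  | cons x t ih =>
    simp only [List.foldl_cons]
    rw [ih, List.count_cons, List.count_cons, List.length_cons]
    by_cases h0 : x = '0'
    · subst h0; simp; push_cast; ring
    · by_cases h1 : x = '1'
      · subst h1; simp [h0]; push_cast; ring
      · simp [h0, h1]; push_cast; ring

-- ===== VERDICT (by name: the statement is the Claim_ definition above) =====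
theorem solution_spec : Claim_equal_solution := by
  intro n _
  unfold Spec_solution solution solution_alt
  simp only [PySem.Str.count, PySem.Str.len_eq, foldl_cost]
  have h0 : ("0" : String).toList = ['0'] := rfl
  have h1 : ("1" : String).toList = ['1'] := rfl
  rw [h0, h1, chars_count_singleton, chars_count_singleton]
  ring
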